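-- pv_equiv track=rewrite | github.com/AscendFoam/SAIR_Competition | src/sair_competition/features/family_tagger.py | _has_balanced_outer_parens
-- ===== SOURCE A (Python) =====
-- def _has_balanced_outer_parens(text: str) -> bool:
--     """检查文本的首尾括号是否构成平衡对。
--
--     即第一个 ``(`` 和最后一个 ``)`` 之间没有提前闭合的深度零点。
--
--     Args:
--         text: 待检查的文本。
--
--     Returns:
--         首尾括号平衡返回 ``True``。
--     """
--     depth = 0
--     for index, char in enumerate(text):
--         if char == "(":
--             depth += 1
--         elif char == ")":
--             depth -= 1
--         if depth == 0 and index != len(text) - 1: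
--             return False
--     return depth == 0
-- ===== SOURCE B (Python) =====
-- def _has_balanced_outer_parens(text: str) -> bool:
--     # Materialize the running-depth profile first, then inspect it.
--     depths = []
--     running = 0
--     for c in text:
--         running += 1 if c == "(" else (-1 if c == ")" else 0)
--         depths.append(running)
--     if any(d == 0 for d in depths[:-1]):
--         return False
--     return not depths or depths[-1] == 0
-- ===== Notes on version B (the rewrite author's own statement) =====
-- stated objective: alternative
-- what changed: B materializes the full running-depth (prefix-sum) profile in one pass and then inspects it in a second pass (any premature zero in depths[:-1], then the final depth), instead of A's single loop with an early return at each index.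
import Mathlib
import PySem

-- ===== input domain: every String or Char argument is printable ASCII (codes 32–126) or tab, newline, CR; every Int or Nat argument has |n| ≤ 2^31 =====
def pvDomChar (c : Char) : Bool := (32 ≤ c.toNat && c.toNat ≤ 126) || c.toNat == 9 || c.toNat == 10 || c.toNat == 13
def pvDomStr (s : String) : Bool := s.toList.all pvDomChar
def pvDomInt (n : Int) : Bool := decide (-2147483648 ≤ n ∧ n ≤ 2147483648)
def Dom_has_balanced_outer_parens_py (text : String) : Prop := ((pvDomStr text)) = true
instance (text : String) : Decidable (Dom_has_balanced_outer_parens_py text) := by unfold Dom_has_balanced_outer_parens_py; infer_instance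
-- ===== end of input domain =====

-- B replaces A's early-return loop by a two-pass prefix-sum decomposition (build the depth profile, then inspect it); same cost, different structure.

-- ===== PORT A =====
-- A's loop: depth updated per char, early False when depth hits 0 before the last index.
-- Invariant-free transliteration: idx and n carried exactly as in the Python.
def pvGoA : List Char → Int → Int → Int → Bool
  | [], depth, _, _ => depth == 0
  | c :: rest, depth, idx, n =>
    let depth := if c = '(' then depth + 1 else if c = ')' then depth - 1 else depth
    if depth == 0 && !(idx == n - 1) then false
    else pvGoA rest depth (idx + 1) n

def has_balanced_outer_parens_py (text : String) : Bool :=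
  pvGoA text.toList 0 0 (text.toList.length : Int)

-- ===== PORT B =====
-- Source B's first pass: list of running depths (prefix sums of the per-char deltas).
def pvAccum : List Char → Int → List Int
  | [], _ => []
  | c :: rest, r =>
    let r' := r + (if c = '(' then 1 else if c = ')' then -1 else 0)
    r' :: pvAccum rest r'

def has_balanced_outer_parens_py_alt (text : String) : Bool :=
  let depths := pvAccum text.toList 0
  if depths.dropLast.any (fun d => d == 0) then false
  else depths.isEmpty || (depths.getLast? == some 0)

-- ===== PRECONDITION & SPEC =====
def Spec_has_balanced_outer_parens_py (text : String) (out : Bool) : Prop := out = has_balanced_outer_parens_py_alt text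
instance (text : String) (out : Bool) : Decidable (Spec_has_balanced_outer_parens_py text out) := by unfold Spec_has_balanced_outer_parens_py; infer_instance

-- ===== CLAIM (what is proved, stated in full; the proofs are below) =====
def Claim_equal_has_balanced_outer_parens_py : Prop := ∀ (text : String), Dom_has_balanced_outer_parens_py text → Spec_has_balanced_outer_parens_py text (has_balanced_outer_parens_py text)

-- ===== LEMMAS AND PROOFS =====

def pvDelta (c : Char) : Int := if c = '(' then 1 else if c = ')' then -1 else 0

lemma pvAccum_cons (c : Char) (cs : List Char) (r : Int) :
    pvAccum (c :: cs) r = (r + pvDelta c) :: pvAccum cs (r + pvDelta c) := rfl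

lemma pvStepA (c : Char) (r : Int) :
    (if c = '(' then r + 1 else if c = ')' then r - 1 else r) = r + pvDelta c := by
  unfold pvDelta; split_ifs <;> ring

-- Suffix-level result of B's inspection, with initial running depth r.
def pvBAux (cs : List Char) (r : Int) : Bool :=
  let depths := pvAccum cs r
  if depths.dropLast.any (fun d => d == 0) then false
  else (depths.getLastD r == 0)

lemma pvAccum_ne_nil (c : Char) (rest : List Char) (r : Int) :
    pvAccum (c :: rest) r ≠ [] := by
  rw [pvAccum_cons]; simp

lemma pvGoA_eq_pvBAux (cs : List Char) (r idx n : Int) (h : idx = n - cs.length) :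
    pvGoA cs r idx n = pvBAux cs r := by
  induction cs generalizing r idx n with
  | nil => simp [pvGoA, pvBAux, pvAccum, List.getLastD]
  | cons c rest ih =>
    have hrest : idx + 1 = n - rest.length := by
      simp only [List.length_cons] at h; push_cast at h ⊢; omega
    have hA : pvGoA (c :: rest) r idx n =
        (if (r + pvDelta c) == 0 && !(idx == n - 1) then false
         else pvGoA rest (r + pvDelta c) (idx + 1) n) := by
      simp only [pvGoA]; rw [pvStepA]
    rw [hA]
    cases rest with
    | nil =>
      have hidx : idx = n - 1 := by
        simp only [List.length_cons, List.length_nil] at h; push_cast at h; omega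
      simp [hidx, pvGoA, pvBAux, pvAccum, pvDelta, List.getLastD]
    | cons c2 rest2 =>
      have hidx : (idx == n - 1) = false := by
        simp only [List.length_cons] at h; push_cast at h
        simp only [beq_eq_false_iff_ne, ne_eq]; omega
      have hne : pvAccum (c2 :: rest2) (r + pvDelta c) ≠ [] := pvAccum_ne_nil _ _ _
      rw [ih (r + pvDelta c) (idx + 1) n hrest]
      simp only [pvBAux, pvAccum_cons c (c2 :: rest2) r]
      rw [List.dropLast_cons_of_ne_nil hne, List.getLastD_cons]
      by_cases hz : r + pvDelta c = 0
      · simp [hz, hidx]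
      · simp [hz, hidx]

lemma pvBAux_eq_alt (cs : List Char) :
    pvBAux cs 0 = (if (pvAccum cs 0).dropLast.any (fun d => d == 0) then false
                   else (pvAccum cs 0).isEmpty || ((pvAccum cs 0).getLast? == some 0)) := by
  cases hcs : pvAccum cs 0 with
  | nil => simp [pvBAux, hcs, List.getLastD]
  | cons d ds =>
    simp only [pvBAux, hcs]
    congr 1

-- ===== VERDICT (by name: the statement is the Claim_ definition above) =====
theorem has_balanced_outer_parens_py_spec : Claim_equal_has_balanced_outer_parens_py := by
  intro text _
  unfold Spec_has_balanced_outer_parens_py has_balanced_outer_parens_py has_balanced_outer_parens_py_alt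
  exact (pvGoA_eq_pvBAux text.toList 0 0 (text.toList.length : Int) (by omega)).trans
    (pvBAux_eq_alt text.toList)
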